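-- pv_equiv track=rewrite | github.com/hramillon/Lower-Bounds-on-a-Memory-Constrained-Backward-Bidirectional-Enumerator | enum2.py | argmin_r
-- ===== SOURCE A (Python) =====
-- def argmin_r(l):
--     assert(len(l)>0)
--     p=0
--     v=l[0]
--     for i in range(len(l)):
--         if l[i] - v <= 0 :
--             v = l[i]
--             p = i
--     return p
-- ===== SOURCE B (Python) =====
-- def argmin_r(l):
--     assert(len(l)>0)
--     m = min(l)
--     for i in range(len(l)-1, -1, -1):
--         if l[i] == m:
--             return i
-- ===== Notes on version B (the rewrite author's own statement) =====
-- stated objective: alternative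
-- what changed: Replaces A's single fused argmin scan (running minimum plus index, updated on <=) by a two-phase structure: compute min(l) in one pass, then scan backward and return the first index holding it (the last minimum).
import Mathlib
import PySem

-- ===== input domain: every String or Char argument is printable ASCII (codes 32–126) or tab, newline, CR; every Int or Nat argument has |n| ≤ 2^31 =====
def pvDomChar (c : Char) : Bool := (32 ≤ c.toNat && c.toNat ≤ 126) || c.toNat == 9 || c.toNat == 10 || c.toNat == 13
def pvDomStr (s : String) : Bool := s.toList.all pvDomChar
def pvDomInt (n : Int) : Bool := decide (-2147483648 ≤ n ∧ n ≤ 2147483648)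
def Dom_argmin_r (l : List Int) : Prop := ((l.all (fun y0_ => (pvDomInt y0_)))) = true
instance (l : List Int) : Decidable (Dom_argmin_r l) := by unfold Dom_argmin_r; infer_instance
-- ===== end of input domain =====

-- B replaces A's fused argmin scan by a two-phase computation (min value first, then backward scan for its last index); same O(n) cost, different decomposition.


-- ===== PORT A =====
-- the loop body: running (p, v), update on l[i] - v <= 0
def argminStep (l : List Int) (s : Int × Int) (i : Int) : Int × Int :=
  if PySem.List.pyGetD l i 0 - s.2 ≤ 0 then (i, PySem.List.pyGetD l i 0) else s

def argmin_r (l : List Int) : Int :=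
  ((PySem.List.pyRange 0 (l.length : Int) 1).foldl (argminStep l)
    (0, PySem.List.pyGetD l 0 0)).1

-- ===== PORT B =====
def argmin_r_alt (l : List Int) : Int :=
  match PySem.List.min? l (fun x => x) with
  | none => 0  -- unreachable: Pre_ requires l ≠ []
  | some m =>
    ((PySem.List.pyRange ((l.length : Int) - 1) (-1) (-1)).find?
      (fun i => PySem.List.pyGetD l i 0 == m)).getD 0

-- ===== PRECONDITION & SPEC =====
-- Pre_ excludes exactly the empty list, on which A's assert (and B's) raises AssertionError.
def Pre_argmin_r (l : List Int) : Prop := l ≠ []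
instance (l : List Int) : Decidable (Pre_argmin_r l) := by unfold Pre_argmin_r; infer_instance
def pvWitness_argmin_r : List Int := ([3, 1, 2, 1, 5])

def Spec_argmin_r (l : List Int) (out : Int) : Prop := out = argmin_r_alt l
instance (l : List Int) (out : Int) : Decidable (Spec_argmin_r l out) := by unfold Spec_argmin_r; infer_instance

-- ===== CLAIM (what is proved, stated in full; the proofs are below) =====
def Claim_equal_argmin_r : Prop := ∀ (l : List Int), Dom_argmin_r l → Pre_argmin_r l → Spec_argmin_r l (argmin_r l)

-- ===== LEMMAS AND PROOFS =====

-- Invariant of A's loop after the first k iterations (1 ≤ k ≤ |l|): the state is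
-- (p, l[p]) where p < k, l[p] is minimal among l[0..k) and strictly below every later l[j] (j in (p,k)).
lemma argmin_loop_inv (l : List Int) (k : Nat) (hk : 1 ≤ k) (hkn : k ≤ l.length) :
    ∃ p : Nat,
      (PySem.List.pyRange 0 (k : Int) 1).foldl (argminStep l) (0, PySem.List.pyGetD l 0 0)
        = ((p : Int), l.getD p 0) ∧
      p < k ∧
      (∀ j : Nat, j < k → l.getD p 0 ≤ l.getD j 0) ∧
      (∀ j : Nat, p < j → j < k → l.getD p 0 < l.getD j 0) := by
  induction k with
  | zero => omega
  | succ k ih =>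
    rcases Nat.eq_or_lt_of_le hk with h1 | h1
    · -- k + 1 = 1 : single iteration on index 0
      refine ⟨0, ?_, by omega, ?_, ?_⟩
      · have : k = 0 := by omega
        subst this
        have : PySem.List.pyRange 0 (1 : Int) 1 = [0] := by decide
        simp [this, argminStep, PySem.List.pyGetD_zero, List.getD]
      · intro j hj; have hj0 : j = 0 := (by omega); subst hj0; exact le_rfl
      · intro j hj1 hj2; omega
    · -- k ≥ 1 : split off the last index k
      obtain ⟨p, hfold, hpk, hmin, hstrict⟩ := ih (by omega) (by omega)
      have hsplit : PySem.List.pyRange 0 ((k : Int) + 1) 1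
          = PySem.List.pyRange 0 (k : Int) 1 ++ [(k : Int)] :=
        PySem.List.pyRange_one_succ_right (a := 0) (b := (k : Int)) (by omega)
      have hkcast : ((k + 1 : Nat) : Int) = (k : Int) + 1 := by push_cast; ring
      rw [hkcast, hsplit, List.foldl_append, hfold]
      simp only [List.foldl_cons, List.foldl_nil, argminStep, PySem.List.pyGetD_natCast]
      by_cases hle : l.getD k 0 - l.getD p 0 ≤ 0
      · refine ⟨k, by rw [if_pos hle], by omega, ?_, ?_⟩
        · intro j hj
          rcases Nat.lt_or_ge j k with h | h
          · exact le_trans (by omega) (hmin j h)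
          · have hjk : j = k := (by omega); subst hjk; exact le_rfl
        · intro j hj1 hj2; omega
      · refine ⟨p, by rw [if_neg hle], by omega, ?_, ?_⟩
        · intro j hj
          rcases Nat.lt_or_ge j k with h | h
          · exact hmin j h
          · have hjk : j = k := (by omega); subst hjk; omega
        · intro j hj1 hj2
          rcases Nat.lt_or_ge j k with h | h
          · exact hstrict j hj1 h
          · have hjk : j = k := (by omega); subst hjk; omega

-- ===== VERDICT (by name: the statement is the Claim_ definition above) =====
theorem argmin_r_spec : Claim_equal_argmin_r := by
  intro l _ hpre
  have hn : 1 ≤ l.length := List.length_pos_of_ne_nil hpre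
  obtain ⟨p, hfold, hpn, hmin, hstrict⟩ := argmin_loop_inv l l.length hn le_rfl
  unfold Spec_argmin_r argmin_r argmin_r_alt
  rw [hfold]
  cases hm : PySem.List.min? l (fun x => x) with
  | none => exact absurd ((PySem.List.min?_eq_none_iff l (fun x => x)).mp hm) hpre
  | some m =>
    have hmem : l.getD p 0 ∈ l := by
      rw [List.getD_eq_getElem _ _ hpn]; exact List.getElem_mem hpn
    have h1 : m ≤ l.getD p 0 := PySem.List.min?_isMin hm _ hmem
    have h2 : l.getD p 0 ≤ m := by
      obtain ⟨j, hj, hje⟩ := List.mem_iff_getElem.mp (PySem.List.min?_mem hm)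
      have := hmin j hj
      rw [List.getD_eq_getElem _ _ hj, hje] at this
      exact this
    have hmp : m = l.getD p 0 := le_antisymm h1 h2
    have hrev : PySem.List.pyRange ((l.length : Int) - 1) (-1) (-1)
        = (PySem.List.pyRange 0 (l.length : Int) 1).reverse := by
      rw [PySem.List.pyRange_neg_one_eq_reverse]; norm_num
    have hsplit : PySem.List.pyRange 0 (l.length : Int) 1
        = PySem.List.pyRange 0 ((p : Int) + 1) 1 ++ PySem.List.pyRange ((p : Int) + 1) (l.length : Int) 1 :=
      PySem.List.pyRange_one_append 0 ((p : Int) + 1) (l.length : Int) (by omega) (by exact_mod_cast hpn)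
    have hlast : PySem.List.pyRange 0 ((p : Int) + 1) 1
        = PySem.List.pyRange 0 (p : Int) 1 ++ [(p : Int)] := by
      exact PySem.List.pyRange_one_succ_right (a := 0) (b := (p : Int)) (by omega)
    have hnone : (PySem.List.pyRange ((p : Int) + 1) (l.length : Int) 1).reverse.find?
        (fun i => PySem.List.pyGetD l i 0 == m) = none := by
      rw [List.find?_eq_none]
      intro i hi
      rw [List.mem_reverse, PySem.List.mem_pyRange_one] at hi
      obtain ⟨hi1, hi2⟩ := hi
      have h0 : (0 : Int) ≤ i := by omega
      have hilt : i < (l.length : Int) := hi2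
      rw [PySem.List.pyGetD_eq_getElem l (i := i) 0 h0 hilt]
      have hjlt : i.toNat < l.length := by omega
      have hpj : p < i.toNat := by omega
      have hs := hstrict i.toNat hpj hjlt
      rw [List.getD_eq_getElem _ _ hjlt] at hs
      simp only [beq_iff_eq]
      omega
    rw [hrev, hsplit, List.reverse_append]
    dsimp only
    rw [List.find?_append, hnone, hlast, List.reverse_append]
    simp only [List.reverse_singleton, List.singleton_append, List.find?_cons]
    have hpred : (PySem.List.pyGetD l (p : Int) 0 == m) = true := by
      simp [hmp]
    rw [hpred]
    simp
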